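-- pv_equiv track=rewrite | github.com/DoubleClik/CS170-Project-1 | main.py | generateGoalState
-- ===== SOURCE A (Python) =====
-- def generateGoalState(n):
--     if n <= 1:
--         return None
--
--     goal = []
--     value = 1
--
--     for rowIndex in range(n):
--         row = []
--         for colIndex in range(n):
--             if rowIndex == n - 1 and colIndex == n - 1:
--                 row.append(0)
--             else:
--                 row.append(value)
--                 value += 1
--         goal.append(tuple(row))
--
--     return tuple(goal)
-- ===== SOURCE B (Python) =====
-- def generateGoalState(n):
--     if n <= 1:
--         return None
--     flat = list(range(1, n * n)) + [0]
--     return tuple(tuple(flat[r * n:(r + 1) * n]) for r in range(n))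
-- ===== Notes on version B (the rewrite author's own statement) =====
-- stated objective: alternative
-- what changed: Replaces the nested row/column loops with a running counter by building the flat sequence 1..n*n-1 followed by 0 once and reshaping it into rows by slicing chunks of n.
import Mathlib
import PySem

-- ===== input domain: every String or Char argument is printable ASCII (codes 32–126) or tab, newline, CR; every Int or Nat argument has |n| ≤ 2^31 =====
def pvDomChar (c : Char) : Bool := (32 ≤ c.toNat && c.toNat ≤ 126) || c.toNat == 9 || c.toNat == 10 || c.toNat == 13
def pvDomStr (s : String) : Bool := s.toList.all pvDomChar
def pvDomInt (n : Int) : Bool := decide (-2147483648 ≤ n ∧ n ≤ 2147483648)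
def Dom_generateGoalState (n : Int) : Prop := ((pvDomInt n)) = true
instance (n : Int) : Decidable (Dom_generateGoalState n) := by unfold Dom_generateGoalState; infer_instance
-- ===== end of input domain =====

-- B builds the flat sequence 1..n*n-1 followed by 0 once and reshapes it into rows by slicing,
-- instead of A's nested row/column loops with a running counter (objective: alternative decomposition).


-- ===== PORT A =====
def generateGoalState (n : Int) : Option (List (List Int)) :=
  if n ≤ 1 then none
  else
    let st := (PySem.List.pyRange 0 n 1).foldl
      (fun (st : List (List Int) × Int) rowIndex =>
        let inner := (PySem.List.pyRange 0 n 1).foldl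
          (fun (rv : List Int × Int) colIndex =>
            if rowIndex = n - 1 ∧ colIndex = n - 1 then (rv.1 ++ [0], rv.2)
            else (rv.1 ++ [rv.2], rv.2 + 1))
          ([], st.2)
        (st.1 ++ [inner.1], inner.2))
      ([], 1)
    some st.1

-- ===== PORT B =====
def generateGoalState_alt (n : Int) : Option (List (List Int)) :=
  if n ≤ 1 then none
  else
    let flat := PySem.List.pyRange 1 (n * n) 1 ++ [0]
    some ((PySem.List.pyRange 0 n 1).map
      (fun r => PySem.List.slice flat (some (r * n)) (some ((r + 1) * n))))

-- ===== PRECONDITION & SPEC =====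
def Spec_generateGoalState (n : Int) (out : Option (List (List Int))) : Prop := out = generateGoalState_alt n
instance (n : Int) (out : Option (List (List Int))) : Decidable (Spec_generateGoalState n out) := by unfold Spec_generateGoalState; infer_instance

-- ===== CLAIM (what is proved, stated in full; the proofs are below) =====
def Claim_equal_generateGoalState : Prop := ∀ (n : Int), Dom_generateGoalState n → Spec_generateGoalState n (generateGoalState n)

-- ===== LEMMAS AND PROOFS =====

-- A's inner loop over columns where the zero branch never fires: a pure counter fold.
theorem pv_inner_counter (n r : Int) (l : List Int)
    (h : ∀ c ∈ l, ¬ (r = n - 1 ∧ c = n - 1)) (row0 : List Int) (v0 : Int) :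
    l.foldl (fun (rv : List Int × Int) c =>
        if r = n - 1 ∧ c = n - 1 then (rv.1 ++ [0], rv.2)
        else (rv.1 ++ [rv.2], rv.2 + 1)) (row0, v0)
    = (row0 ++ PySem.List.pyRange v0 (v0 + l.length) 1, v0 + l.length) := by
  induction l generalizing row0 v0 with
  | nil => simp [PySem.List.pyRange_one_eq_nil (le_refl v0)]
  | cons c l ih =>
    have hc : ¬ (r = n - 1 ∧ c = n - 1) := h c (by simp)
    simp only [List.foldl_cons, if_neg hc]
    rw [ih (fun x hx => h x (by simp [hx]))]
    have h1 : PySem.List.pyRange v0 (v0 + 1 + l.length) 1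
        = v0 :: PySem.List.pyRange (v0 + 1) (v0 + 1 + l.length) 1 :=
      PySem.List.pyRange_one_cons (by omega)
    simp only [List.length_cons, Prod.mk.injEq]
    push_cast
    refine ⟨?_, by ring⟩
    rw [show v0 + ((l.length : Int) + 1) = v0 + 1 + l.length by ring, h1]
    simp

theorem pv_drop_pyRange (k : Nat) (a b : Int) :
    (PySem.List.pyRange a b 1).drop k = PySem.List.pyRange (a + k) b 1 := by
  induction k generalizing a with
  | zero => simp
  | succ k ih =>
    by_cases hab : a < b
    · rw [PySem.List.pyRange_one_cons hab, List.drop_succ_cons, ih]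
      congr 1; push_cast; ring
    · rw [PySem.List.pyRange_one_eq_nil (by omega), PySem.List.pyRange_one_eq_nil (by push_cast; omega)]
      simp

theorem pv_take_pyRange (k : Nat) (a b : Int) (h : a + k ≤ b) :
    (PySem.List.pyRange a b 1).take k = PySem.List.pyRange a (a + k) 1 := by
  induction k generalizing a with
  | zero => simp [PySem.List.pyRange_one_eq_nil (le_refl a)]
  | succ k ih =>
    have hcast : a + (((k + 1 : Nat)) : Int) = a + 1 + (k : Int) := by omega
    rw [hcast, PySem.List.pyRange_one_cons (a := a) (b := b) (by push_cast at h; omega),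
        List.take_succ_cons, ih (a + 1) (by push_cast at h ⊢; omega),
        PySem.List.pyRange_one_cons (a := a) (b := a + 1 + (k : Int)) (by omega)]

theorem pv_length_pyRange_toNat (a b : Int) :
    ((PySem.List.pyRange a b 1).length : Int) = max (b - a) 0 := by
  rw [PySem.List.length_pyRange_one]; omega

-- B's slice of the flat list is exactly row r, for a middle row (0 ≤ r ≤ n-2).
theorem pv_slice_mid (n r : Int) (hn : 2 ≤ n) (h0 : 0 ≤ r) (h1 : r ≤ n - 2) :
    PySem.List.slice (PySem.List.pyRange 1 (n * n) 1 ++ [0]) (some (r * n)) (some ((r + 1) * n))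
      = PySem.List.pyRange (1 + r * n) (1 + (r + 1) * n) 1 := by
  have hrn : 0 ≤ r * n := mul_nonneg h0 (by omega)
  have hrel : (r + 1) * n = r * n + n := by ring
  have hend : (r + 1) * n ≤ n * n - n := by nlinarith
  rw [PySem.List.slice_toNat _ hrn (by nlinarith)]
  have hlenP : ((r * n).toNat : Int) ≤ ((PySem.List.pyRange 1 (n * n) 1).length : Int) := by
    rw [pv_length_pyRange_toNat]; omega
  rw [List.drop_append_of_le_length (by exact_mod_cast hlenP), pv_drop_pyRange,
      Int.toNat_of_nonneg hrn]
  have htn : ((r + 1) * n).toNat - (r * n).toNat = n.toNat := by omega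
  rw [htn]
  have hlen2 : (n.toNat : Int) ≤ ((PySem.List.pyRange (1 + r * n) (n * n) 1).length : Int) := by
    rw [pv_length_pyRange_toNat]; omega
  rw [List.take_append_of_le_length (by exact_mod_cast hlen2),
      pv_take_pyRange _ _ _ (by omega)]
  congr 1; omega

-- B's slice of the flat list for the last row r = n-1.
theorem pv_slice_last (n : Int) (hn : 2 ≤ n) :
    PySem.List.slice (PySem.List.pyRange 1 (n * n) 1 ++ [0]) (some ((n - 1) * n)) (some (n * n))
      = PySem.List.pyRange (1 + (n - 1) * n) (n * n) 1 ++ [0] := by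
  have hrn : 0 ≤ (n - 1) * n := mul_nonneg (by omega) (by omega)
  have hid : n * n = (n - 1) * n + n := by ring
  rw [PySem.List.slice_toNat _ hrn (by nlinarith)]
  have hlenP : (((n - 1) * n).toNat : Int) ≤ ((PySem.List.pyRange 1 (n * n) 1).length : Int) := by
    rw [pv_length_pyRange_toNat]; omega
  rw [List.drop_append_of_le_length (by exact_mod_cast hlenP), pv_drop_pyRange,
      Int.toNat_of_nonneg hrn]
  apply List.take_of_length_le
  simp only [List.length_append, List.length_cons, List.length_nil,
    PySem.List.length_pyRange_one]
  omega

-- A's last-row inner loop after the rowIndex test has been discharged: append the counter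
-- until the final column, where 0 is appended.
theorem pv_inner_last_counter (n : Int) (l : List Int)
    (h : ∀ c ∈ l, c ≠ n - 1) (row0 : List Int) (v0 : Int) :
    l.foldl (fun (rv : List Int × Int) c =>
        if c = n - 1 then (rv.1 ++ [0], rv.2)
        else (rv.1 ++ [rv.2], rv.2 + 1)) (row0, v0)
    = (row0 ++ PySem.List.pyRange v0 (v0 + l.length) 1, v0 + l.length) := by
  induction l generalizing row0 v0 with
  | nil => simp [PySem.List.pyRange_one_eq_nil (le_refl v0)]
  | cons c l ih =>
    have hc : ¬ c = n - 1 := h c (by simp)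
    simp only [List.foldl_cons, if_neg hc]
    rw [ih (fun x hx => h x (by simp [hx]))]
    have h1 : PySem.List.pyRange v0 (v0 + 1 + l.length) 1
        = v0 :: PySem.List.pyRange (v0 + 1) (v0 + 1 + l.length) 1 :=
      PySem.List.pyRange_one_cons (by omega)
    simp only [List.length_cons, Prod.mk.injEq]
    push_cast
    refine ⟨?_, by ring⟩
    rw [show v0 + ((l.length : Int) + 1) = v0 + 1 + l.length by ring, h1]
    simp

-- A's outer loop invariant over the first j rows (j ≤ n-1), for ANY column list of length n:
-- rows are consecutive ranges of n values and the counter stands at 1 + j*n.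
theorem pv_outer_inv (n : Int) (cols : List Int)
    (hcols : (cols.length : Int) = n) :
    ∀ j : Int, 0 ≤ j → j ≤ n - 1 →
    (PySem.List.pyRange 0 j 1).foldl
      (fun (st : List (List Int) × Int) rowIndex =>
        (st.1 ++ [(cols.foldl (fun (rv : List Int × Int) colIndex =>
            if rowIndex = n - 1 ∧ colIndex = n - 1 then (rv.1 ++ [0], rv.2)
            else (rv.1 ++ [rv.2], rv.2 + 1)) ([], st.2)).1],
         (cols.foldl (fun (rv : List Int × Int) colIndex =>
            if rowIndex = n - 1 ∧ colIndex = n - 1 then (rv.1 ++ [0], rv.2)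
            else (rv.1 ++ [rv.2], rv.2 + 1)) ([], st.2)).2))
      ([], 1)
    = ((PySem.List.pyRange 0 j 1).map
        (fun r => PySem.List.pyRange (1 + r * n) (1 + (r + 1) * n) 1), 1 + j * n) := by
  intro j hj0
  induction j, hj0 using Int.le_induction with
  | base => intro _; simp [PySem.List.pyRange_one_eq_nil (le_refl (0:Int))]
  | succ j hj0 ih =>
    intro hj
    have hsplit : PySem.List.pyRange 0 (j + 1) 1
        = PySem.List.pyRange 0 j 1 ++ [j] :=
      PySem.List.pyRange_one_succ_right hj0
    rw [hsplit, List.foldl_append, ih (by omega), List.map_append,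
        List.foldl_cons, List.foldl_nil]
    have hinner := pv_inner_counter n j cols
      (fun c hc => by intro ⟨h1, _⟩; omega) [] (1 + j * n)
    simp only [hinner, hcols, List.map_cons, List.map_nil, List.nil_append, Prod.mk.injEq]
    refine ⟨?_, by ring⟩
    congr 2
    ring

-- ===== VERDICT (by name: the statement is the Claim_ definition above) =====
theorem generateGoalState_spec : Claim_equal_generateGoalState := by
  intro n _
  unfold Spec_generateGoalState generateGoalState generateGoalState_alt
  by_cases hn1 : n ≤ 1
  · simp [hn1]
  · have hn : 2 ≤ n := by omega
    simp only [if_neg hn1, Option.some.injEq]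
    have hsplit : PySem.List.pyRange 0 n 1
        = PySem.List.pyRange 0 (n - 1) 1 ++ [n - 1] := by
      have h := PySem.List.pyRange_one_succ_right (a := 0) (b := n - 1) (by omega)
      rw [show n - 1 + 1 = n by ring] at h
      exact h
    rw [hsplit]
    have hcols : (((PySem.List.pyRange 0 (n - 1) 1 ++ [n - 1]).length : Nat) : Int) = n := by
      simp only [List.length_append, List.length_cons, List.length_nil,
        PySem.List.length_pyRange_one]
      omega
    rw [List.foldl_append, List.map_append,
        pv_outer_inv n _ hcols (n - 1) (by omega) (le_refl _)]
    simp only [List.foldl_cons, List.foldl_nil, List.map_cons, List.map_nil, true_and]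
    -- evaluate A's last (r = n-1) inner loop
    have hlast : (PySem.List.pyRange 0 (n - 1) 1 ++ [n - 1]).foldl
        (fun (rv : List Int × Int) colIndex =>
          if colIndex = n - 1 then (rv.1 ++ [0], rv.2)
          else (rv.1 ++ [rv.2], rv.2 + 1))
        ([], 1 + (n - 1) * n)
        = (PySem.List.pyRange (1 + (n - 1) * n) (n * n) 1 ++ [0], n * n) := by
      have hstep : ∀ (row : List Int) (v : Int),
          [n - 1].foldl (fun (rv : List Int × Int) c =>
            if c = n - 1 then (rv.1 ++ [0], rv.2)
            else (rv.1 ++ [rv.2], rv.2 + 1)) (row, v) = (row ++ [0], v) := by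
        intro row v; simp
      rw [List.foldl_append,
          pv_inner_last_counter n _
            (fun c hc => by
              rw [PySem.List.mem_pyRange_one] at hc
              omega) [] (1 + (n - 1) * n),
          hstep]
      simp only [List.nil_append, PySem.List.length_pyRange_one, Prod.mk.injEq]
      rw [show (((n : Int) - 1 - 0).toNat : Int) = n - 1 by omega]
      exact ⟨by rw [show 1 + (n - 1) * n + (n - 1) = n * n by ring], by ring⟩
    rw [hlast]
    congr 1
    · exact (List.map_congr_left (fun r hr => by
        rw [PySem.List.mem_pyRange_one] at hr
        exact (pv_slice_mid n r hn hr.1 (by omega)).symm))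
    · rw [show (n - 1 + 1) * n = n * n by ring, pv_slice_last n hn]
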